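-- pv_equiv track=rewrite | github.com/jueedhar/sleep-transitions | bout_dist.py | inter_bout_intervals
-- ===== SOURCE A (Python) =====
-- def inter_bout_intervals(series, target=0):
--     """
--     Compute inter-bout intervals (counts between target events,so a target = 0 computes
--     the inactivity bout by counting no. of 1s between the 0s).
--       """
--     intervals = []
--     count = None
--     for val in series:
--         if val == target:
--             if count is not None:
--                 intervals.append(count)
--             count = 0
--         else:
--             if count is not None:
--                 count += 1
--     return intervals
-- ===== SOURCE B (Python) =====
-- def inter_bout_intervals(series, target=0):
--     """Inter-bout intervals via index arithmetic on target positions."""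
--     positions = [i for i, val in enumerate(series) if val == target]
--     return [j - i - 1 for i, j in zip(positions, positions[1:])]
-- ===== Notes on version B (the rewrite author's own statement) =====
-- stated objective: alternative
-- what changed: Replaces the incremental counter/state machine with a two-phase computation: collect the indices of target occurrences, then take pairwise differences j - i - 1 of consecutive positions.
import Mathlib
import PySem

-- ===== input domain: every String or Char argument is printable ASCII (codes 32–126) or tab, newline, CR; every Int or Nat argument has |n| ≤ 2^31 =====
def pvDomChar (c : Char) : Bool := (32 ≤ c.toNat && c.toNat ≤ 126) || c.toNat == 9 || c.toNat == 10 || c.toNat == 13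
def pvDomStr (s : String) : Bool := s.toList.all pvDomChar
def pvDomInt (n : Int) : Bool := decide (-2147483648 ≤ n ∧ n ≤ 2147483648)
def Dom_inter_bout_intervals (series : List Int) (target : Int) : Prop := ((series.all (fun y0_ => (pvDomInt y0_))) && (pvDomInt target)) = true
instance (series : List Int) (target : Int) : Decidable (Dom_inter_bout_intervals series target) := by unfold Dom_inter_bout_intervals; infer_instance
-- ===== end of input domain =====

-- B collects the indices of target occurrences and takes pairwise differences,
-- instead of A's incremental counter state machine (objective: alternative decomposition).

-- ===== PORT A =====
-- state = (intervals, count) with count : Option Int mirroring Python's None/int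
def interBoutStep (target : Int) (st : List Int × Option Int) (val : Int) : List Int × Option Int :=
  if val == target then
    (match st.2 with
     | some c => st.1 ++ [c]
     | none => st.1, some 0)
  else
    (match st.2 with
     | some c => (st.1, some (c + 1))
     | none => (st.1, none))

def inter_bout_intervals (series : List Int) (target : Int) : List Int :=
  (series.foldl (interBoutStep target) ([], none)).1

-- ===== PORT B =====
def inter_bout_intervals_alt (series : List Int) (target : Int) : List Int :=
  let positions := ((PySem.List.enumerate series 0).filter (fun p => p.2 == target)).map (fun p => p.1)
  (positions.zip (positions.drop 1)).map (fun p => p.2 - p.1 - 1)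

-- ===== PRECONDITION & SPEC =====
def Spec_inter_bout_intervals (series : List Int) (target : Int) (out : List Int) : Prop := out = inter_bout_intervals_alt series target
instance (series : List Int) (target : Int) (out : List Int) : Decidable (Spec_inter_bout_intervals series target out) := by unfold Spec_inter_bout_intervals; infer_instance

-- ===== CLAIM (what is proved, stated in full; the proofs are below) =====
def Claim_equal_inter_bout_intervals : Prop := ∀ (series : List Int) (target : Int), Dom_inter_bout_intervals series target → Spec_inter_bout_intervals series target (inter_bout_intervals series target)

-- ===== LEMMAS AND PROOFS =====

-- reference recursion: gaps after a target was seen (count = c), pre before any target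
def ibiGaps (target : Int) : List Int → Int → List Int
  | [], _ => []
  | v :: l, c => if v = target then c :: ibiGaps target l 0 else ibiGaps target l (c + 1)

def ibiPre (target : Int) : List Int → List Int
  | [] => []
  | v :: l => if v = target then ibiGaps target l 0 else ibiPre target l

-- positions of target starting at index k
def ibiPos (target : Int) (k : Int) : List Int → List Int
  | [] => []
  | v :: l => if v = target then k :: ibiPos target (k + 1) l else ibiPos target (k + 1) l

lemma ibiPos_eq (target k : Int) (l : List Int) :
    ((PySem.List.enumerate l k).filter (fun p => p.2 == target)).map (fun p => p.1)
      = ibiPos target k l := by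
  induction l generalizing k with
  | nil => simp [ibiPos, PySem.List.enumerate_nil]
  | cons v l ih =>
    simp only [PySem.List.enumerate_cons, List.filter_cons, ibiPos]
    by_cases h : v = target <;> simp [h, ih]

-- A-side: foldl characterization
lemma ibi_foldl_some (target : Int) (l : List Int) (acc : List Int) (c : Int) :
    (l.foldl (interBoutStep target) (acc, some c)).1 = acc ++ ibiGaps target l c := by
  induction l generalizing acc c with
  | nil => simp [ibiGaps]
  | cons v l ih =>
    simp only [List.foldl_cons, interBoutStep, ibiGaps]
    by_cases h : v = target
    · simp [h, ih]
    · simp [h, ih]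

lemma ibi_foldl_none (target : Int) (l : List Int) (acc : List Int) :
    (l.foldl (interBoutStep target) (acc, none)).1 = acc ++ ibiPre target l := by
  induction l generalizing acc with
  | nil => simp [ibiPre]
  | cons v l ih =>
    simp only [List.foldl_cons, interBoutStep, ibiPre]
    by_cases h : v = target
    · simp [h, ibi_foldl_some]
    · simp [h, ih]

-- B-side: zip of consecutive positions after a previous target at index p
lemma ibi_zip_gaps (target : Int) (l : List Int) (k p : Int) :
    ((p :: ibiPos target k l).zip (ibiPos target k l)).map (fun q => q.2 - q.1 - 1)
      = ibiGaps target l (k - p - 1) := by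
  induction l generalizing k p with
  | nil => simp [ibiPos, ibiGaps]
  | cons v l ih =>
    simp only [ibiPos, ibiGaps]
    by_cases h : v = target
    · simp only [h, if_pos rfl, List.zip_cons_cons, List.map_cons]
      have := ih (k + 1) k
      simpa [this, show k + 1 - k - 1 = (0 : Int) by ring] using rfl
    · simp only [h, if_neg h, if_neg h]
      have := ih (k + 1) p
      simpa [show k + 1 - p - 1 = k - p - 1 + 1 by ring] using this

lemma ibi_zip_pre (target : Int) (l : List Int) (k : Int) :
    ((ibiPos target k l).zip ((ibiPos target k l).drop 1)).map (fun q => q.2 - q.1 - 1)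
      = ibiPre target l := by
  induction l generalizing k with
  | nil => simp [ibiPos, ibiPre]
  | cons v l ih =>
    simp only [ibiPos, ibiPre]
    by_cases h : v = target
    · simp only [h, if_pos rfl, List.drop_succ_cons, List.drop_zero]
      have := ibi_zip_gaps target l (k + 1) k
      simpa [show k + 1 - k - 1 = (0 : Int) by ring] using this
    · simp only [h, if_neg h, if_neg h]
      exact ih (k + 1)

-- ===== VERDICT (by name: the statement is the Claim_ definition above) =====
theorem inter_bout_intervals_spec : Claim_equal_inter_bout_intervals := by
  intro series target _
  unfold Spec_inter_bout_intervals inter_bout_intervals inter_bout_intervals_alt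
  rw [ibi_foldl_none, ibiPos_eq, ibi_zip_pre]
  simp
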